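-- pv_equiv track=rewrite | github.com/alextruesdale/Moodys-image-processing | column_crop/codebase/ColumnWindowFinder.py | run_filter
-- ===== SOURCE A (Python) =====
-- from operator import itemgetter
--
-- def run_filter(page_index, year):
--     """Determine whether or not to operate on incoming class file."""
--
--     manual_begin_end_dict = {
--         '1920': [[-1, False], [814, True], [1156, False]],
--         '1921': [[-1, False], [506, True], [716, False], [969, True], [1259, False]]
--     }
--
--     difference_list = sorted([[item, page_index - item[0]] for item in
--                               manual_begin_end_dict[year] if page_index - item[0] > 0],
--                               key=itemgetter(1))
--
--     in_column = difference_list[0][0][1]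
--     return in_column
-- ===== SOURCE B (Python) =====
-- def run_filter(page_index, year):
--     """Determine whether or not to operate on incoming class file."""
--
--     manual_begin_end_dict = {
--         '1920': [[-1, False], [814, True], [1156, False]],
--         '1921': [[-1, False], [506, True], [716, False], [969, True], [1259, False]]
--     }
--
--     best = None
--     for item in manual_begin_end_dict[year]:
--         if item[0] < page_index and (best is None or best[0] < item[0]):
--             best = item
--     return best[1]
-- ===== Notes on version B (the rewrite author's own statement) =====
-- stated objective: simpler
-- what changed: Replaces the filter-comprehension + sort-by-difference + index pipeline with a single pass over the year's boundary list that keeps the entry with the largest start index strictly below page_index and returns its flag.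
import Mathlib
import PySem

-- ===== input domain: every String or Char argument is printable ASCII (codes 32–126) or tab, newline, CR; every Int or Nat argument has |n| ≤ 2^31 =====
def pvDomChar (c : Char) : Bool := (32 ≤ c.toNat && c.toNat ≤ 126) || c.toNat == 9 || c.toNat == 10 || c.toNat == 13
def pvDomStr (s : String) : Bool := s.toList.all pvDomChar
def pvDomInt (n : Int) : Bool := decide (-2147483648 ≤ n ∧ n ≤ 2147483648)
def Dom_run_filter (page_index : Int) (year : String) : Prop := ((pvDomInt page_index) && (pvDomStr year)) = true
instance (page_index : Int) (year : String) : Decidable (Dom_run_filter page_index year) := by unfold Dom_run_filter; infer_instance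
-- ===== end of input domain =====

-- B replaces A's build-filter-sort-index pipeline by a single pass keeping the best prior boundary (objective: simpler).


-- ===== PORT A =====
-- the literal dict manual_begin_end_dict (identical in both Pythons)
def pvTable : PySem.Dict String (List (Int × Bool)) :=
  ((PySem.Dict.empty.insert "1920" [(-1, false), (814, true), (1156, false)]).insert
    "1921" [(-1, false), (506, true), (716, false), (969, true), (1259, false)])

def run_filter (page_index : Int) (year : String) : Bool :=
  -- manual_begin_end_dict[year]; KeyError (none) is excluded by Pre_, the default [] is never used there
  let entries := (pvTable.get? year).getD []
  -- sorted([[item, page_index - item[0]] for item in … if page_index - item[0] > 0], key=itemgetter(1))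
  let difference_list :=
    PySem.List.sorted
      ((entries.filter (fun item => decide (0 < page_index - item.1))).map
        (fun item => (item, page_index - item.1)))
      (fun p => p.2) false
  -- difference_list[0][0][1]; IndexError (none) is excluded by Pre_, the default is never used there
  ((PySem.List.pyGet? difference_list 0).getD ((0, false), 0)).1.2

-- ===== PORT B =====
def run_filter_alt (page_index : Int) (year : String) : Bool :=
  let best :=
    ((pvTable.get? year).getD []).foldl
      (fun best item =>
        if item.1 < page_index ∧ (best = none ∨ (best.getD (0, false)).1 < item.1) then
          some item
        else best)
      none
  -- best[1]; best = None (TypeError) is excluded by Pre_, the default is never used there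
  (best.getD (0, false)).2

-- ===== PRECONDITION & SPEC =====
-- Pre_ excludes exactly the inputs where A raises: an unknown year (KeyError) and
-- page_index < 0, where no boundary entry precedes the page (IndexError).
def Pre_run_filter (page_index : Int) (year : String) : Prop :=
  (year = "1920" ∨ year = "1921") ∧ 0 ≤ page_index
instance (page_index : Int) (year : String) : Decidable (Pre_run_filter page_index year) := by
  unfold Pre_run_filter; infer_instance

def pvWitness_run_filter : Int × String := (820, "1920")

def Spec_run_filter (page_index : Int) (year : String) (out : Bool) : Prop := out = run_filter_alt page_index year
instance (page_index : Int) (year : String) (out : Bool) : Decidable (Spec_run_filter page_index year out) := by unfold Spec_run_filter; infer_instance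

-- ===== CLAIM (what is proved, stated in full; the proofs are below) =====
def Claim_equal_run_filter : Prop := ∀ (page_index : Int) (year : String), Dom_run_filter page_index year → Pre_run_filter page_index year → Spec_run_filter page_index year (run_filter page_index year)

-- ===== LEMMAS AND PROOFS =====
theorem run_filter_eq_1920 (pi : Int) (hp : 0 ≤ pi) :
    run_filter pi "1920" = run_filter_alt pi "1920" := by
  have hg : pvTable.get? "1920" = some [(-1, false), (814, true), (1156, false)] := rfl
  simp only [run_filter, run_filter_alt, hg, Option.getD_some]
  by_cases h1 : (814:Int) < pi <;> by_cases h2 : (1156:Int) < pi <;>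
    simp [PySem.List.sorted, PySem.List.insertBy, PySem.List.pyGet?, PySem.List.pyIdx?,
      h1, h2, show (-1:Int) < pi by omega]

theorem run_filter_eq_1921 (pi : Int) (hp : 0 ≤ pi) :
    run_filter pi "1921" = run_filter_alt pi "1921" := by
  have hg : pvTable.get? "1921" =
      some [(-1, false), (506, true), (716, false), (969, true), (1259, false)] := rfl
  simp only [run_filter, run_filter_alt, hg, Option.getD_some]
  by_cases h1 : (506:Int) < pi <;> by_cases h2 : (716:Int) < pi <;>
    by_cases h3 : (969:Int) < pi <;> by_cases h4 : (1259:Int) < pi <;>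
    simp [PySem.List.sorted, PySem.List.insertBy, PySem.List.pyGet?, PySem.List.pyIdx?,
      h1, h2, h3, h4, show (-1:Int) < pi by omega]

-- ===== VERDICT (by name: the statement is the Claim_ definition above) =====
theorem run_filter_spec : Claim_equal_run_filter := by
  intro pi year _ hpre
  unfold Spec_run_filter
  rcases hpre with ⟨hy | hy, hp⟩ <;> subst hy
  · exact run_filter_eq_1920 pi hp
  · exact run_filter_eq_1921 pi hp
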